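-- pv_equiv track=rewrite | github.com/rrwick/Autocycler-paper | assess_assembly.py | get_normalised_ranges
-- ===== SOURCE A (Python) =====
-- def get_normalised_ranges(ref_len, start, end):
--     """
--     Convert an alignment defined by a start and end (which may span multiple copies)
--     into a list of intervals on the single-copy reference.
--     """
--     total = end - start
--     offset = start % ref_len
--     intervals = []
--     first_length = min(ref_len - offset, total)
--     intervals.append((offset, offset + first_length))
--     total -= first_length
--     while total >= ref_len:
--         intervals.append((0, ref_len))
--         total -= ref_len
--     if total > 0:
--         intervals.append((0, total))
--     return intervals
-- ===== SOURCE B (Python) =====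
-- def get_normalised_ranges(ref_len, start, end):
--     """
--     Convert an alignment defined by a start and end (which may span multiple copies)
--     into a list of intervals on the single-copy reference.
--     Closed-form version: the number of full-reference intervals is computed by
--     integer division instead of a decrementing loop.
--     """
--     total = end - start
--     offset = start % ref_len
--     first_length = min(ref_len - offset, total)
--     remaining = total - first_length
--     full, rem = divmod(remaining, ref_len)
--     out = [(offset, offset + first_length)]
--     out += [(0, ref_len)] * full
--     if rem > 0:
--         out.append((0, rem))
--     return out
-- ===== Notes on version B (the rewrite author's own statement) =====
-- stated objective: simpler
-- what changed: The decrementing while loop that appends one (0, ref_len) interval per reference copy is replaced by a single divmod: the count of full copies and the leftover are computed in closed form and the list is built with list multiplication.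
import Mathlib
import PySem

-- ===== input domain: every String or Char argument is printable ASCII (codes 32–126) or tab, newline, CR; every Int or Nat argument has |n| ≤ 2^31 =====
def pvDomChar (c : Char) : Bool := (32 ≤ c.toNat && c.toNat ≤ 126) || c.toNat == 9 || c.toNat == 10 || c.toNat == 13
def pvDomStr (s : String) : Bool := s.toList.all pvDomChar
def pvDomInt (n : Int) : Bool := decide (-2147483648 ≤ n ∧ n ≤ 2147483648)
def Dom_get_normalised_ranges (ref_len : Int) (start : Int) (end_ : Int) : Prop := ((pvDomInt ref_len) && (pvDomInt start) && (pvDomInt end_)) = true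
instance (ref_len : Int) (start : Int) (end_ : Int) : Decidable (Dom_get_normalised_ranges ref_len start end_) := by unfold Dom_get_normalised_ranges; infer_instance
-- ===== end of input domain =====

-- B replaces A's decrementing while loop by a closed-form divmod count of the full-copy intervals.

-- ===== PORT A =====
-- A's while loop: appends (0, ref_len) and decrements total while total >= ref_len.
-- The '0 < ref_len' part of the guard is only for Lean termination: in Python the loop
-- diverges when ref_len < 0 and division by zero has already raised when ref_len = 0,
-- so those inputs are outside Pre_ and the guard never changes the computation on Pre_.
def pvALoop (ref_len : Int) (total : Int) (acc : List (Int × Int)) : List (Int × Int) × Int :=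
  if h : 0 < ref_len ∧ ref_len ≤ total then
    pvALoop ref_len (total - ref_len) (acc ++ [(0, ref_len)])
  else (acc, total)
termination_by total.toNat
decreasing_by omega

def get_normalised_ranges (ref_len : Int) (start : Int) (end_ : Int) : List (Int × Int) :=
  let total := end_ - start
  let offset := PySem.Int.mod start ref_len
  let first_length := min (ref_len - offset) total
  let intervals := [(offset, offset + first_length)]
  let total := total - first_length
  let p := pvALoop ref_len total intervals
  if p.2 > 0 then p.1 ++ [(0, p.2)] else p.1

-- ===== PORT B =====
def get_normalised_ranges_alt (ref_len : Int) (start : Int) (end_ : Int) : List (Int × Int) :=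
  let total := end_ - start
  let offset := PySem.Int.mod start ref_len
  let first_length := min (ref_len - offset) total
  let remaining := total - first_length
  let full := PySem.Int.floordiv remaining ref_len
  let rem := PySem.Int.mod remaining ref_len
  let out := [(offset, offset + first_length)] ++ List.replicate full.toNat (0, ref_len)
  if rem > 0 then out ++ [(0, rem)] else out

-- ===== PRECONDITION & SPEC =====
-- Pre_ excludes only non-returning inputs: ref_len = 0 (Python raises ZeroDivisionError
-- on 'start % ref_len') and ref_len < 0 (the while loop never terminates, since
-- 'total -= ref_len' then increases total).
def Pre_get_normalised_ranges (ref_len : Int) (start : Int) (end_ : Int) : Prop := 0 < ref_len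
instance (ref_len : Int) (start : Int) (end_ : Int) : Decidable (Pre_get_normalised_ranges ref_len start end_) := by unfold Pre_get_normalised_ranges; infer_instance
def pvWitness_get_normalised_ranges : Int × Int × Int := (5, 3, 17)

def Spec_get_normalised_ranges (ref_len : Int) (start : Int) (end_ : Int) (out : List (Int × Int)) : Prop := out = get_normalised_ranges_alt ref_len start end_
instance (ref_len : Int) (start : Int) (end_ : Int) (out : List (Int × Int)) : Decidable (Spec_get_normalised_ranges ref_len start end_ out) := by unfold Spec_get_normalised_ranges; infer_instance

-- ===== CLAIM (what is proved, stated in full; the proofs are below) =====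
def Claim_equal_get_normalised_ranges : Prop := ∀ (ref_len : Int) (start : Int) (end_ : Int), Dom_get_normalised_ranges ref_len start end_ → Pre_get_normalised_ranges ref_len start end_ → Spec_get_normalised_ranges ref_len start end_ (get_normalised_ranges ref_len start end_)

-- ===== LEMMAS AND PROOFS =====

-- The loop computes exactly 'acc ++ (t / ref_len) copies of (0, ref_len)' and leaves t % ref_len.
theorem pvALoop_closed (r : Int) (hr : 0 < r) : ∀ (t : Int) (acc : List (Int × Int)), 0 ≤ t →
    pvALoop r t acc = (acc ++ List.replicate ((t / r).toNat) (0, r), t % r) := by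
  intro t acc
  induction t, acc using pvALoop.induct r with
  | case1 t acc h ih =>
    intro ht
    rw [pvALoop, dif_pos h, ih (by omega)]
    have hq : (t - r) / r = t / r - 1 := by
      have h1 := Int.add_mul_ediv_right t (-1) (show r ≠ 0 by omega)
      have h2 : t + -1 * r = t - r := by ring
      rw [h2] at h1; omega
    have hm : (t - r) % r = t % r := by
      have h1 := Int.add_mul_emod_self_left (a := t - r) (b := r) (c := 1)
      rw [show t - r + r * 1 = t by ring] at h1
      exact h1.symm
    have hge : 1 ≤ t / r := (Int.le_ediv_iff_mul_le hr).mpr (by omega)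
    rw [hq, hm]
    have hn : (t / r).toNat = ((t / r - 1).toNat) + 1 := by omega
    rw [hn, List.replicate_succ]
    simp
  | case2 t acc h =>
    intro ht
    have hlt : t < r := by omega
    rw [pvALoop, dif_neg h, Int.ediv_eq_zero_of_lt ht hlt, Int.emod_eq_of_lt ht hlt]
    simp

-- ===== VERDICT (by name: the statement is the Claim_ definition above) =====
theorem get_normalised_ranges_spec : Claim_equal_get_normalised_ranges := by
  intro ref_len start end_ _ hr
  simp only [Spec_get_normalised_ranges, get_normalised_ranges, get_normalised_ranges_alt]
  have hrem : 0 ≤ (end_ - start) - min (ref_len - PySem.Int.mod start ref_len) (end_ - start) := by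
    have := min_le_right (ref_len - PySem.Int.mod start ref_len) (end_ - start)
    omega
  rw [pvALoop_closed ref_len hr _ _ hrem, PySem.Int.floordiv_eq_ediv_of_pos hr,
    PySem.Int.mod_eq_emod_of_pos hr (a := (end_ - start) - min (ref_len - PySem.Int.mod start ref_len) (end_ - start))]
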